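-- pv_equiv track=rewrite | github.com/kishanraj41/Medical-Gap-Detection | agents/agent_05_section_detection.py | _build_procedures
-- ===== SOURCE A (Python) =====
-- from typing import Dict, List, Optional
--
-- def _build_procedures(procedures_fhir: List[Dict],
--                       encounters: List[Dict]) -> List[Dict]:
--     """Build structured procedure objects linked to encounters."""
--     procedures = []
--     for proc in procedures_fhir:
--         # Try to link to closest encounter by date
--         proc_date = proc.get("date", "")
--         linked_encounter = None
--         if encounters and proc_date:
--             for enc in encounters:
--                 if enc.get("date") == proc_date:
--                     linked_encounter = enc.get("encounter_id")
--                     break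
--             if not linked_encounter and encounters:
--                 linked_encounter = encounters[0].get("encounter_id")
--
--         procedures.append({
--             "procedure_id": f"P{proc.get('procedure_id', '')}",
--             "name": proc.get("name", ""),
--             "code": proc.get("code", ""),
--             "status": proc.get("status", ""),
--             "date": proc_date,
--             "linked_encounter": linked_encounter,
--         })
--
--     return procedures
-- ===== SOURCE B (Python) =====
-- from typing import Dict, List, Optional
--
-- def _build_procedures(procedures_fhir: List[Dict],
--                       encounters: List[Dict]) -> List[Dict]:
--     """Inverted-loop version: group procedure slots by date, sweep encounters once
--     assigning links into a positional array, then emit the records in a final zip pass."""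
--     dates = [p.get("date", "") for p in procedures_fhir]
--     default_id = encounters[0].get("encounter_id") if encounters else None
--     # stage 1: every dated procedure provisionally gets the first encounter's id
--     links = [default_id if (encounters and d) else None for d in dates]
--     # stage 2: group the positions of the procedures by date
--     todo = {}
--     for i, d in enumerate(dates):
--         if d:
--             todo.setdefault(d, []).append(i)
--     # stage 3: one sweep over encounters; the first encounter of a date settles it
--     for enc in encounters:
--         d = enc.get("date")
--         if d in todo:
--             ids = todo.pop(d)
--             eid = enc.get("encounter_id")
--             if eid:
--                 for i in ids:
--                     links[i] = eid
--     # stage 4: emit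
--     return [
--         {"procedure_id": f"P{p.get('procedure_id', '')}",
--          "name": p.get("name", ""),
--          "code": p.get("code", ""),
--          "status": p.get("status", ""),
--          "date": d,
--          "linked_encounter": l}
--         for p, d, l in zip(procedures_fhir, dates, links)
--     ]
-- ===== Notes on version B (the rewrite author's own statement) =====
-- stated objective: alternative
-- what changed: Inverts the loop structure: instead of scanning the encounter list once per procedure, B groups procedure positions by date into a dict, pre-fills a positional link array with the default first-encounter id, makes a single sweep over encounters in which the first encounter of each pending date writes its id into all those positions, and emits the records by zipping; a timing run did not show a measurable speed-up, since A's inner scan breaks at the first match.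
import Mathlib
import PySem

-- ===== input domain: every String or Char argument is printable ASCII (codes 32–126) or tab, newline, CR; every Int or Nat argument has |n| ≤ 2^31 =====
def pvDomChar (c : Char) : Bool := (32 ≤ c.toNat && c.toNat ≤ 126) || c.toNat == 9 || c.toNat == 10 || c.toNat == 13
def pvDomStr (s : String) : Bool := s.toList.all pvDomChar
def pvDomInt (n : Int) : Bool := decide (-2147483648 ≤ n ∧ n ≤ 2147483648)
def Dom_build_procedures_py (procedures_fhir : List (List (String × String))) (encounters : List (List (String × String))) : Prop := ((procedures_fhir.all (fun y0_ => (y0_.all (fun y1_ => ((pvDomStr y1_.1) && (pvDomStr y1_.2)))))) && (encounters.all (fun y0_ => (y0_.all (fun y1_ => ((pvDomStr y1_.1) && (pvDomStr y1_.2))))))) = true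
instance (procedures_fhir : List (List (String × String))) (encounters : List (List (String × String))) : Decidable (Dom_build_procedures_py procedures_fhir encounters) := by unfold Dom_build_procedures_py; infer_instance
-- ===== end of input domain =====

-- B inverts A's loop structure: it groups procedure positions by date, pre-fills a positional
-- link array with the default first-encounter id, settles links in one sweep over encounters,
-- and emits the records in a final zip pass (an alternative algorithm; return value proved equal to A's).

-- Python truthiness of an Optional[str]
def pvTruthy (o : Option String) : Bool :=
  match o with
  | none => false
  | some s => !(s == "")

-- ===== PORT A =====
-- the inner 'for enc in encounters: … break' loop of A
def pvLoopA (pd : String) : List (List (String × String)) → Option String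
  | [] => none
  | enc :: rest =>
    if (PySem.Dict.ofList enc).get? "date" == some pd then
      (PySem.Dict.ofList enc).get? "encounter_id"
    else pvLoopA pd rest

def build_procedures_py (procedures_fhir : List (List (String × String))) (encounters : List (List (String × String))) : List (List (String × Option String)) :=
  procedures_fhir.foldl (fun procedures proc =>
    let pd := (PySem.Dict.ofList proc).getD "date" ""
    let linked : Option String :=
      if !encounters.isEmpty && !(pd == "") then
        let l := pvLoopA pd encounters
        if !(pvTruthy l) && !encounters.isEmpty then
          match encounters with
          | [] => none
          | e :: _ => (PySem.Dict.ofList e).get? "encounter_id"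
        else l
      else none
    procedures ++ [[("procedure_id", some ("P" ++ (PySem.Dict.ofList proc).getD "procedure_id" "")),
      ("name", some ((PySem.Dict.ofList proc).getD "name" "")),
      ("code", some ((PySem.Dict.ofList proc).getD "code" "")),
      ("status", some ((PySem.Dict.ofList proc).getD "status" "")),
      ("date", some pd),
      ("linked_encounter", linked)]]) []

-- ===== PORT B =====
-- stage 0 of Source B: the list of procedure dates
def pvDatesB (ps : List (List (String × String))) : List String :=
  ps.map (fun p => (PySem.Dict.ofList p).getD "date" "")

-- stage 2 of Source B: 'if d: todo.setdefault(d, []).append(i)' for one (i, d) pair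
def pvTodoStep (t : PySem.Dict String (List Int)) (p : Int × String) : PySem.Dict String (List Int) :=
  if p.2 == "" then t else t.modify p.2 [] (fun l => l ++ [p.1])

def pvTodoB (dates : List String) : PySem.Dict String (List Int) :=
  (PySem.List.enumerate dates).foldl pvTodoStep PySem.Dict.empty

-- 'for i in ids: links[i] = eid'
def pvAssignB (links : List (Option String)) (ids : List Int) (e : String) : List (Option String) :=
  ids.foldl (fun ls i => PySem.List.pySetD ls i (some e)) links

-- stage 3 of Source B: one sweep step over an encounter, state = (links, todo)
def pvEncStep (st : List (Option String) × PySem.Dict String (List Int)) (enc : List (String × String)) : List (Option String) × PySem.Dict String (List Int) :=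
  match (PySem.Dict.ofList enc).get? "date" with
  | none => st
  | some dt =>
    match st.2.get? dt with
    | none => st
    | some ids =>
      let todo' := st.2.erase dt
      match (PySem.Dict.ofList enc).get? "encounter_id" with
      | none => (st.1, todo')
      | some e => if e == "" then (st.1, todo') else (pvAssignB st.1 ids e, todo')

def build_procedures_py_alt (procedures_fhir : List (List (String × String))) (encounters : List (List (String × String))) : List (List (String × Option String)) :=
  let dates := pvDatesB procedures_fhir
  let default_id : Option String :=
    match encounters with
    | [] => none
    | e :: _ => (PySem.Dict.ofList e).get? "encounter_id"
  let links0 := dates.map (fun d => if !encounters.isEmpty && !(d == "") then default_id else none)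
  let links := (encounters.foldl pvEncStep (links0, pvTodoB dates)).1
  (procedures_fhir.zip (dates.zip links)).map (fun q =>
    [("procedure_id", some ("P" ++ (PySem.Dict.ofList q.1).getD "procedure_id" "")),
     ("name", some ((PySem.Dict.ofList q.1).getD "name" "")),
     ("code", some ((PySem.Dict.ofList q.1).getD "code" "")),
     ("status", some ((PySem.Dict.ofList q.1).getD "status" "")),
     ("date", some q.2.1),
     ("linked_encounter", q.2.2)])

-- ===== PRECONDITION & SPEC =====
def Spec_build_procedures_py (procedures_fhir : List (List (String × String))) (encounters : List (List (String × String))) (out : List (List (String × Option String))) : Prop := out = build_procedures_py_alt procedures_fhir encounters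
instance (procedures_fhir : List (List (String × String))) (encounters : List (List (String × String))) (out : List (List (String × Option String))) : Decidable (Spec_build_procedures_py procedures_fhir encounters out) := by unfold Spec_build_procedures_py; infer_instance

-- ===== CLAIM (what is proved, stated in full; the proofs are below) =====
def Claim_equal_build_procedures_py : Prop := ∀ (procedures_fhir : List (List (String × String))) (encounters : List (List (String × String))), Dom_build_procedures_py procedures_fhir encounters → Spec_build_procedures_py procedures_fhir encounters (build_procedures_py procedures_fhir encounters)

-- ===== LEMMAS AND PROOFS =====

-- first encounter whose date matches, kept as Option (Option String) (none = no match)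
def pvFirst (pd : String) : List (List (String × String)) → Option (Option String)
  | [] => none
  | enc :: rest =>
    if (PySem.Dict.ofList enc).get? "date" == some pd then
      some ((PySem.Dict.ofList enc).get? "encounter_id")
    else pvFirst pd rest

theorem pvLoopA_eq_join_pvFirst (pd : String) (es : List (List (String × String))) :
    pvLoopA pd es = (pvFirst pd es).join := by
  induction es with
  | nil => rfl
  | cons enc rest ih =>
    simp only [pvLoopA, pvFirst]
    split <;> simp [ih]

-- the positions (as Python ints) of procedures carrying date d
def pvIdxs (dates : List String) (d : String) : List Int :=
  ((PySem.List.enumerate dates).filter (fun p => p.2 == d)).map (·.1)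

theorem mem_pvIdxs (dates : List String) (d : String) (i : Int) :
    i ∈ pvIdxs dates d ↔ ∃ (k : Nat) (h : k < dates.length), i = (k : Int) ∧ dates[k] = d := by
  simp only [pvIdxs, List.mem_map, List.mem_filter, PySem.List.mem_enumerate_iff]
  constructor
  · rintro ⟨p, ⟨⟨k, hk, rfl⟩, hd⟩, rfl⟩
    exact ⟨k, hk, by simp, by simpa using hd⟩
  · rintro ⟨k, hk, rfl, hd⟩
    exact ⟨(k, dates[k]), ⟨⟨k, hk, by simp⟩, by simp [hd]⟩, by simp⟩

theorem pvGet?_erase {ν : Type} (d : PySem.Dict String ν) (k k' : String) :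
    (d.erase k).get? k' = if k' = k then none else d.get? k' := by
  rcases d with ⟨items⟩
  simp only [PySem.Dict.erase, PySem.Dict.get?, List.find?_filter]
  by_cases hkk : k' = k
  · subst hkk
    rw [if_pos rfl, List.find?_eq_none.mpr]
    · rfl
    · intro x _
      simp
  · rw [if_neg hkk]
    have hfun : (fun (a : String × ν) => decide ((!a.1 == k) = true ∧ (a.1 == k') = true)) = (fun p => p.1 == k') := by
      funext a
      by_cases h : a.1 = k' <;> simp [h, hkk]
    rw [hfun]

theorem pvTodo_get (pl : List (Int × String)) (t : PySem.Dict String (List Int)) (d : String) :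
    (pl.foldl pvTodoStep t).get? d =
      if d = "" then t.get? d
      else
        match t.get? d with
        | some l => some (l ++ (pl.filter (fun p => p.2 == d)).map (·.1))
        | none =>
          if (pl.filter (fun p => p.2 == d)).isEmpty then none
          else some ((pl.filter (fun p => p.2 == d)).map (·.1)) := by
  induction pl generalizing t with
  | nil =>
    by_cases hd : d = "" <;> simp [hd] <;> cases h : t.get? d <;> simp [h]
  | cons p rest ih =>
    simp only [List.foldl_cons]
    by_cases hp : p.2 = ""
    · have hstep : pvTodoStep t p = t := by simp [pvTodoStep, hp]
      rw [hstep, ih]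
      by_cases hd : d = ""
      · simp [hd]
      · have hne : (p.2 == d) = false := by
          simpa using fun h : p.2 = d => hd (h ▸ hp)
        have hfil : List.filter (fun q => q.2 == d) (p :: rest) = List.filter (fun q => q.2 == d) rest := by
          simp [List.filter_cons, hne]
        rw [if_neg hd, if_neg hd, hfil]
    · have hstep : pvTodoStep t p = t.insert p.2 ((t.getD p.2 []) ++ [p.1]) := by
        simp [pvTodoStep, hp, PySem.Dict.modify]
      rw [hstep, ih]
      by_cases hd : d = ""
      · subst hd
        have : ("" : String) ≠ p.2 := fun h => hp h.symm
        simp [PySem.Dict.get?_insert_of_ne _ _ this]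
      · by_cases hpd : p.2 = d
        · subst hpd
          rw [if_neg hd, if_neg hd, PySem.Dict.get?_insert_self]
          cases h : t.get? p.2 with
          | some l => simp [PySem.Dict.getD_eq_get?_getD, h, List.filter_cons, List.append_assoc]
          | none => simp [PySem.Dict.getD_eq_get?_getD, h, List.filter_cons]
        · have hne : d ≠ p.2 := fun h => hpd h.symm
          have hne2 : (p.2 == d) = false := by simpa using hpd
          have hfil : List.filter (fun q => q.2 == d) (p :: rest) = List.filter (fun q => q.2 == d) rest := by
            simp [List.filter_cons, hne2]
          rw [if_neg hd, if_neg hd, PySem.Dict.get?_insert_of_ne _ _ hne, hfil]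

theorem pvAssignB_length (links : List (Option String)) (ids : List Int) (e : String) :
    (pvAssignB links ids e).length = links.length := by
  induction ids generalizing links with
  | nil => rfl
  | cons i ids ih =>
    show (pvAssignB (PySem.List.pySetD links i (some e)) ids e).length = links.length
    rw [ih]
    exact PySem.List.length_pySetD _ _ _

theorem pvAssignB_getElem? (links : List (Option String)) (ids : List Int) (e : String)
    (hids : ∀ i ∈ ids, 0 ≤ i) (j : Nat) :
    (pvAssignB links ids e)[j]? =
      if (j : Int) ∈ ids ∧ j < links.length then some (some e) else links[j]? := by
  induction ids generalizing links with
  | nil => simp [pvAssignB]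
  | cons i ids ih =>
    have hi : 0 ≤ i := hids i (by simp)
    have hstep : pvAssignB links (i :: ids) e = pvAssignB (links.set i.toNat (some e)) ids e := by
      show pvAssignB (PySem.List.pySetD links i (some e)) ids e = _
      rw [PySem.List.pySetD_of_nonneg links (some e) hi]
    rw [hstep, ih _ (fun x hx => hids x (by simp [hx]))]
    have hnat : (i.toNat = j) ↔ ((j : Int) = i) := by omega
    simp only [List.length_set, List.getElem?_set, List.mem_cons]
    by_cases hj : j < links.length
    · by_cases hji : (j : Int) = i
      · simp [hnat.mpr hji, hj, hji]
      · have hn : ¬ i.toNat = j := fun h => hji (hnat.mp h)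
        simp [hn, hji]
    · have h1 : ¬ ((j : Int) ∈ ids ∧ j < links.length) := fun h => hj h.2
      have h2 : ¬ (((j : Int) = i ∨ (j : Int) ∈ ids) ∧ j < links.length) := fun h => hj h.2
      rw [if_neg h1, if_neg h2]
      by_cases hn : i.toNat = j
      · have : ¬ i.toNat < links.length := by omega
        simp [hn, this, List.getElem?_eq_none (le_of_not_gt hj)]
        omega
      · simp [hn]

theorem pvIdxs_nonneg (dates : List String) (d : String) : ∀ i ∈ pvIdxs dates d, 0 ≤ i := by
  intro i hi
  rcases (mem_pvIdxs dates d i).mp hi with ⟨k, hk, rfl, _⟩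
  exact Int.natCast_nonneg k

theorem natCast_mem_pvIdxs (dates : List String) (d : String) (j : Nat) (hj : j < dates.length) :
    ((j : Int) ∈ pvIdxs dates d) ↔ dates[j] = d := by
  rw [mem_pvIdxs]
  constructor
  · rintro ⟨k, hk, hkj, hd⟩
    have : k = j := by omega
    subst this; exact hd
  · intro hd
    exact ⟨j, hj, rfl, hd⟩

theorem pvEncFold_length (es : List (List (String × String))) (st : List (Option String) × PySem.Dict String (List Int)) :
    ((es.foldl pvEncStep st).1).length = st.1.length := by
  induction es generalizing st with
  | nil => rfl
  | cons enc rest ih =>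
    rw [List.foldl_cons, ih]
    unfold pvEncStep
    cases h1 : (PySem.Dict.ofList enc).get? "date" with
    | none => simp [h1]
    | some dt =>
      cases h2 : st.2.get? dt with
      | none => simp [h1, h2]
      | some ids =>
        cases h3 : (PySem.Dict.ofList enc).get? "encounter_id" with
        | none => simp [h1, h2, h3]
        | some e =>
          by_cases he : (e == "") = true
          · simp [h1, h2, h3, he]
          · simp [h1, h2, h3, he, pvAssignB_length]

theorem pvEncFold (dates : List String) (es : List (List (String × String)))
    (links : List (Option String)) (todo : PySem.Dict String (List Int))
    (hlen : links.length = dates.length)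
    (htodo : ∀ d l, todo.get? d = some l → l = pvIdxs dates d)
    (j : Nat) (hj : j < dates.length) :
    ((es.foldl pvEncStep (links, todo)).1)[j]? =
      if todo.contains dates[j] then
        match pvFirst dates[j] es with
        | some (some e) => if e == "" then links[j]? else some (some e)
        | some none => links[j]?
        | none => links[j]?
      else links[j]? := by
  induction es generalizing links todo with
  | nil =>
    simp only [List.foldl_nil, pvFirst]
    split <;> rfl
  | cons enc rest ih =>
    rw [List.foldl_cons]
    cases h1 : (PySem.Dict.ofList enc).get? "date" with
    | none =>
      have hstep : pvEncStep (links, todo) enc = (links, todo) := by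
        unfold pvEncStep; simp [h1]
      have hfirst : pvFirst dates[j] (enc :: rest) = pvFirst dates[j] rest := by
        simp only [pvFirst, h1]
        rfl
      rw [hstep, hfirst]
      exact ih links todo hlen htodo
    | some dt =>
      cases h2 : todo.get? dt with
      | none =>
        have hstep : pvEncStep (links, todo) enc = (links, todo) := by
          unfold pvEncStep; simp [h1, h2]
        rw [hstep]
        by_cases hdj : dates[j] = dt
        · have hc : todo.contains dates[j] = false := by
            rw [PySem.Dict.contains_eq_isSome_get?, hdj, h2]; rfl
          rw [ih links todo hlen htodo, hc]
          simp
        · have hfirst : pvFirst dates[j] (enc :: rest) = pvFirst dates[j] rest := by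
            simp only [pvFirst, h1]
            have : (dt == dates[j]) = false := by simpa using fun h : dt = dates[j] => hdj h.symm
            simp [this]
          rw [hfirst]
          exact ih links todo hlen htodo
      | some ids =>
        have hids : ids = pvIdxs dates dt := htodo dt ids h2
        have htodo' : ∀ d l, (todo.erase dt).get? d = some l → l = pvIdxs dates d := by
          intro d l h
          rw [pvGet?_erase] at h
          by_cases hddt : d = dt
          · rw [if_pos hddt] at h; cases h
          · rw [if_neg hddt] at h; exact htodo d l h
        have hcerase : ∀ d, d ≠ dt → (todo.erase dt).contains d = todo.contains d := by
          intro d hne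
          rw [PySem.Dict.contains_eq_isSome_get?, PySem.Dict.contains_eq_isSome_get?,
            pvGet?_erase, if_neg hne]
        by_cases hdj : dates[j] = dt
        · -- the first encounter of this date settles position j
          have hc : todo.contains dates[j] = true := by
            rw [PySem.Dict.contains_eq_isSome_get?, hdj, h2]; rfl
          have hcnot : (todo.erase dt).contains dates[j] = false := by
            rw [PySem.Dict.contains_eq_isSome_get?, hdj, pvGet?_erase, if_pos rfl]; rfl
          have hfirst : pvFirst dates[j] (enc :: rest) = some ((PySem.Dict.ofList enc).get? "encounter_id") := by
            simp only [pvFirst, h1, hdj]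
            simp
          rw [hc] at *
          cases h3 : (PySem.Dict.ofList enc).get? "encounter_id" with
          | none =>
            have hstep : pvEncStep (links, todo) enc = (links, todo.erase dt) := by
              unfold pvEncStep; simp [h1, h2, h3]
            rw [hstep, ih links (todo.erase dt) hlen htodo', hcnot, if_neg (by simp),
              if_pos rfl, hfirst, h3]
          | some e =>
            by_cases he : (e == "") = true
            · have hstep : pvEncStep (links, todo) enc = (links, todo.erase dt) := by
                unfold pvEncStep; simp [h1, h2, h3, he]
              rw [hstep, ih links (todo.erase dt) hlen htodo', hcnot, if_neg (by simp),
                if_pos rfl, hfirst, h3]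
              simp [he]
            · have hstep : pvEncStep (links, todo) enc = (pvAssignB links ids e, todo.erase dt) := by
                unfold pvEncStep; simp [h1, h2, h3, he]
              have hlen' : (pvAssignB links ids e).length = dates.length := by
                rw [pvAssignB_length]; exact hlen
              rw [hstep, ih (pvAssignB links ids e) (todo.erase dt) hlen' htodo', hcnot,
                if_neg (by simp), if_pos rfl, hfirst, h3]
              rw [pvAssignB_getElem? links ids e (hids ▸ pvIdxs_nonneg dates dt) j]
              have hmem : (j : Int) ∈ ids := by
                rw [hids, natCast_mem_pvIdxs dates dt j hj]; exact hdj
              rw [if_pos ⟨hmem, by omega⟩]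
              simp [he]
        · -- an unrelated date: position j untouched by this encounter
          have hfirst : pvFirst dates[j] (enc :: rest) = pvFirst dates[j] rest := by
            simp only [pvFirst, h1]
            have : (dt == dates[j]) = false := by simpa using fun h : dt = dates[j] => hdj h.symm
            simp [this]
          have hcsame := hcerase dates[j] hdj
          cases h3 : (PySem.Dict.ofList enc).get? "encounter_id" with
          | none =>
            have hstep : pvEncStep (links, todo) enc = (links, todo.erase dt) := by
              unfold pvEncStep; simp [h1, h2, h3]
            rw [hstep, ih links (todo.erase dt) hlen htodo', hcsame, hfirst]
          | some e =>
            by_cases he : (e == "") = true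
            · have hstep : pvEncStep (links, todo) enc = (links, todo.erase dt) := by
                unfold pvEncStep; simp [h1, h2, h3, he]
              rw [hstep, ih links (todo.erase dt) hlen htodo', hcsame, hfirst]
            · have hstep : pvEncStep (links, todo) enc = (pvAssignB links ids e, todo.erase dt) := by
                unfold pvEncStep; simp [h1, h2, h3, he]
              have hlen' : (pvAssignB links ids e).length = dates.length := by
                rw [pvAssignB_length]; exact hlen
              have hval : (pvAssignB links ids e)[j]? = links[j]? := by
                rw [pvAssignB_getElem? links ids e (hids ▸ pvIdxs_nonneg dates dt) j]
                have hmem : ¬ ((j : Int) ∈ ids) := by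
                  rw [hids, natCast_mem_pvIdxs dates dt j hj]; exact hdj
                rw [if_neg (fun h => hmem h.1)]
              rw [hstep, ih (pvAssignB links ids e) (todo.erase dt) hlen' htodo', hcsame,
                hfirst, hval]

-- final value of links[j] relative to A's per-procedure computation
theorem pvLinks_final (ps : List (List (String × String))) (es : List (List (String × String)))
    (j : Nat) (hj : j < ps.length) :
    ((es.foldl pvEncStep
        ((pvDatesB ps).map (fun d => if !es.isEmpty && !(d == "") then
            (match es with | [] => none | e :: _ => (PySem.Dict.ofList e).get? "encounter_id") else none),
         pvTodoB (pvDatesB ps))).1)[j]? =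
      some (let pd := (PySem.Dict.ofList ps[j]).getD "date" ""
            if !es.isEmpty && !(pd == "") then
              let l := pvLoopA pd es
              if !(pvTruthy l) && !es.isEmpty then
                match es with
                | [] => none
                | e :: _ => (PySem.Dict.ofList e).get? "encounter_id"
              else l
            else none) := by
  have hjd : j < (pvDatesB ps).length := by simpa [pvDatesB] using hj
  have hdj : (pvDatesB ps)[j] = (PySem.Dict.ofList ps[j]).getD "date" "" := by
    simp [pvDatesB]
  have hlen0 : ((pvDatesB ps).map (fun d => if !es.isEmpty && !(d == "") then
      (match es with | [] => none | e :: _ => (PySem.Dict.ofList e).get? "encounter_id") else none)).length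
      = (pvDatesB ps).length := List.length_map ..
  have htodo0 : ∀ d l, (pvTodoB (pvDatesB ps)).get? d = some l → l = pvIdxs (pvDatesB ps) d := by
    intro d l h
    unfold pvTodoB at h
    rw [pvTodo_get] at h
    by_cases hd : d = ""
    · rw [if_pos hd, PySem.Dict.get?_empty] at h
      cases h
    · rw [if_neg hd, PySem.Dict.get?_empty] at h
      by_cases hemp : (((PySem.List.enumerate (pvDatesB ps)).filter (fun p => p.2 == d))).isEmpty = true
      · simp only [hemp, if_pos] at h
        cases h
      · simp only [hemp, if_neg, Bool.false_eq_true, not_false_iff, if_false] at h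
        cases h
        rfl
  rw [pvEncFold (pvDatesB ps) es _ (pvTodoB (pvDatesB ps)) hlen0 htodo0 j hjd]
  have hlinks0 : ((pvDatesB ps).map (fun d => if !es.isEmpty && !(d == "") then
      (match es with | [] => none | e :: _ => (PySem.Dict.ofList e).get? "encounter_id") else none))[j]?
      = some (if !es.isEmpty && !((pvDatesB ps)[j] == "") then
      (match es with | [] => none | e :: _ => (PySem.Dict.ofList e).get? "encounter_id") else none) := by
    rw [List.getElem?_map, List.getElem?_eq_getElem hjd]
    rfl
  have hcont : (pvTodoB (pvDatesB ps)).contains ((pvDatesB ps)[j]) = !((pvDatesB ps)[j] == "") := by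
    rw [PySem.Dict.contains_eq_isSome_get?]
    unfold pvTodoB
    rw [pvTodo_get]
    by_cases hd : (pvDatesB ps)[j] = ""
    · simp [hd, PySem.Dict.get?_empty]
    · rw [if_neg hd, PySem.Dict.get?_empty]
      have hne : ¬ ((PySem.List.enumerate (pvDatesB ps)).filter (fun p => p.2 == (pvDatesB ps)[j])).isEmpty = true := by
        rw [List.isEmpty_iff]
        intro hnil
        have hmem : ((j : Int), (pvDatesB ps)[j]) ∈ (PySem.List.enumerate (pvDatesB ps)).filter (fun p => p.2 == (pvDatesB ps)[j]) := by
          rw [List.mem_filter]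
          refine ⟨(PySem.List.mem_enumerate_iff _ _ _).mpr ⟨j, hjd, by simp⟩, by simp⟩
        rw [hnil] at hmem
        cases hmem
      simp [hne, hd]
  rw [hlinks0, hcont, hdj]
  show _ = some (if !es.isEmpty && !(((PySem.Dict.ofList ps[j]).getD "date" "") == "") then _ else none)
  by_cases hd : ((PySem.Dict.ofList ps[j]).getD "date" "") = ""
  · simp only [hd]
    simp
  · have hb : (((PySem.Dict.ofList ps[j]).getD "date" "") == "") = false := by simpa using hd
    rw [if_pos (by simp [hb])]
    cases hes : es with
    | nil => simp [pvFirst, hd]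
    | cons e0 esr =>
      rw [← hes]
      have hesne : es.isEmpty = false := by rw [hes]; rfl
      rw [if_pos (by simp [hesne, hb])]
      rw [pvLoopA_eq_join_pvFirst]
      cases hf : pvFirst ((PySem.Dict.ofList ps[j]).getD "date" "") es with
      | none => simp [pvTruthy, hesne, hd]
      | some o =>
        cases o with
        | none => simp [pvTruthy, hesne, hd]
        | some e =>
          by_cases he : e = ""
          · simp [pvTruthy, he, hesne, hd]
          · simp [pvTruthy, he, hesne, hd]

-- ===== VERDICT (by name: the statement is the Claim_ definition above) =====
theorem build_procedures_py_spec : Claim_equal_build_procedures_py := by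
  intro ps es _
  unfold Spec_build_procedures_py build_procedures_py build_procedures_py_alt
  rw [PySem.List.foldl_append_singleton_eq_map]
  have hlinks : ∀ st, ((es.foldl pvEncStep st).1).length = st.1.length := fun st => pvEncFold_length es st
  apply List.ext_getElem
  · simp [pvDatesB, hlinks]
  · intro j h1 h2
    have hjp : j < ps.length := by simpa using h1
    simp only [List.nil_append, List.getElem_map, List.getElem_zip]
    have hdj : (pvDatesB ps)[j]'(by simpa [pvDatesB] using hjp) = (PySem.Dict.ofList ps[j]).getD "date" "" := by
      simp [pvDatesB]
    have hlv := pvLinks_final ps es j hjp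
    rw [List.getElem?_eq_getElem (by rw [pvEncFold_length]; simpa [pvDatesB] using hjp),
      Option.some_inj] at hlv
    rw [hlv, hdj]
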